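-- pv_equiv track=rewrite | github.com/Josepassinato/camada-osprey-core | enhanced_features.py | humanize_legal_text
-- ===== SOURCE A (Python) =====
-- def humanize_legal_text(text: str) -> str:
--     """Remove frases muito genéricas e substitui por versões mais naturais"""
--     replacements = {
--         "based on the foregoing": "based on the evidence provided",
--         "We respectfully request": "We request",
--         "it is respectfully submitted": "we submit",
--         "pursuant to": "under",
--         "hereby certify": "certify",
--     }
--
--     for old, new in replacements.items():
--         text = text.replace(old, new)
--
--     return text
-- ===== SOURCE B (Python) =====
-- def humanize_legal_text(text: str) -> str:
--     # one pass: at each position substitute the first phrase of the table that matches there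
--     replacements = {
--         "based on the foregoing": "based on the evidence provided",
--         "We respectfully request": "We request",
--         "it is respectfully submitted": "we submit",
--         "pursuant to": "under",
--         "hereby certify": "certify",
--     }
--
--     out = []
--     i = 0
--     n = len(text)
--     while i < n:
--         for old, new in replacements.items():
--             if text.startswith(old, i):
--                 out.append(new)
--                 i += len(old)
--                 break
--         else:
--             out.append(text[i])
--             i += 1
--     return "".join(out)
-- ===== Notes on version B (the rewrite author's own statement) =====
-- stated objective: alternative
-- what changed: B makes a single left-to-right pass over the text, replacing at each position the first matching phrase (first-match-wins scanner), instead of A's five sequential full-string replace passes; equivalent because the phrases never overlap each other and no replacement text re-creates or chains into another phrase.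
import Mathlib
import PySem

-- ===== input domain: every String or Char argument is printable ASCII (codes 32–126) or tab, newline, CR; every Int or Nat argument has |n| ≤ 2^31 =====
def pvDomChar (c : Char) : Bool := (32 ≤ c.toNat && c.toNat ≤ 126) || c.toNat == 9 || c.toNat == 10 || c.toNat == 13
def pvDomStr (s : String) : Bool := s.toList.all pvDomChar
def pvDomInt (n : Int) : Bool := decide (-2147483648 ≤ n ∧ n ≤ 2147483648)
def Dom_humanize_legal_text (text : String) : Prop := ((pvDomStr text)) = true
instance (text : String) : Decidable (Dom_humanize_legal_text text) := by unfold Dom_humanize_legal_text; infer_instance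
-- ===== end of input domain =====

-- B replaces A's five sequential full-string replace passes by one left-to-right scan that
-- substitutes the first matching phrase at each position (objective: alternative, same cost).

-- ===== PORT A =====
-- A: dict of phrases, then 'for old, new in replacements.items(): text = text.replace(old, new)'
def humanize_legal_text (text : String) : String :=
  let replacements : List (String × String) :=
    [("based on the foregoing", "based on the evidence provided"),
     ("We respectfully request", "We request"),
     ("it is respectfully submitted", "we submit"),
     ("pursuant to", "under"),
     ("hereby certify", "certify")]
  replacements.foldl (fun t p => PySem.Str.replace t p.1 p.2) text

-- ===== PORT B =====
-- the same replacement table, as char lists (Source B's dict, in insertion order)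
def pvReplB : List (List Char × List Char) :=
  [("based on the foregoing".toList, "based on the evidence provided".toList),
   ("We respectfully request".toList, "We request".toList),
   ("it is respectfully submitted".toList, "we submit".toList),
   ("pursuant to".toList, "under".toList),
   ("hereby certify".toList, "certify".toList)]

-- Source B's inner 'for old, new in replacements.items(): if text.startswith(old, i): … break / else:'
-- first entry whose key is a prefix of the remaining text; returns its value and the key length
def pvFindB : List (List Char × List Char) → List Char → Option (List Char × Nat)
  | [], _ => none
  | (old, new) :: rest, s => if old.isPrefixOf s then some (new, old.length) else pvFindB rest s

-- every key of the table is nonempty: a found match advances the scan (termination of pvScanB)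
theorem pvFindB_pos {s v : List Char} {n : Nat} (h : pvFindB pvReplB s = some (v, n)) : 1 ≤ n := by
  simp only [pvReplB, pvFindB] at h
  split_ifs at h <;> simp_all <;> omega

-- Source B's outer while loop: one pass, emitting either a replacement (skipping the key) or one char
def pvScanB : List Char → List Char
  | [] => []
  | c :: t =>
    match hf : pvFindB pvReplB (c :: t) with
    | some (new, n) => new ++ pvScanB (List.drop n (c :: t))
    | none => c :: pvScanB t
termination_by s => s.length
decreasing_by
  · have := pvFindB_pos hf; simp; omega
  · simp

def humanize_legal_text_alt (text : String) : String := String.ofList (pvScanB text.toList)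

-- ===== PRECONDITION & SPEC =====
def Spec_humanize_legal_text (text : String) (out : String) : Prop := out = humanize_legal_text_alt text
instance (text : String) (out : String) : Decidable (Spec_humanize_legal_text text out) := by unfold Spec_humanize_legal_text; infer_instance

-- ===== CLAIM (what is proved, stated in full; the proofs are below) =====
def Claim_equal_humanize_legal_text : Prop := ∀ (text : String), Dom_humanize_legal_text text → Spec_humanize_legal_text text (humanize_legal_text text)

-- ===== LEMMAS AND PROOFS =====

-- named keys/values (abbrevs so that `decide` and simp see through them)
abbrev pvK1 : List Char := "based on the foregoing".toList
abbrev pvV1 : List Char := "based on the evidence provided".toList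
abbrev pvK2 : List Char := "We respectfully request".toList
abbrev pvV2 : List Char := "We request".toList
abbrev pvK3 : List Char := "it is respectfully submitted".toList
abbrev pvV3 : List Char := "we submit".toList
abbrev pvK4 : List Char := "pursuant to".toList
abbrev pvV4 : List Char := "under".toList
abbrev pvK5 : List Char := "hereby certify".toList
abbrev pvV5 : List Char := "certify".toList

-- u is "compatibility-free" w.r.t. k: no nonempty suffix of u is prefix-comparable with k
abbrev pvCF (u k : List Char) : Prop :=
  ∀ t, t < u.length → ¬ (u.drop t <+: k) ∧ ¬ (k <+: u.drop t)

theorem pv_pref_append_false {k u : List Char} (s : List Char)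
    (h1 : ¬ u <+: k) (h2 : ¬ k <+: u) : ¬ k <+: (u ++ s) := by
  intro h
  rcases List.prefix_or_prefix_of_prefix h (List.prefix_append u s) with h' | h'
  · exact h2 h'
  · exact h1 h'

-- clean structural model of CPython str.replace (nonempty pattern): leftmost, non-overlapping,
-- scanning resumes after the inserted replacement
def pvRep (old new : List Char) : List Char → List Char
  | [] => []
  | c :: t =>
    if old.isEmpty then c :: pvRep old new t
    else if old.isPrefixOf (c :: t) then new ++ pvRep old new (List.drop old.length (c :: t))
    else c :: pvRep old new t
termination_by l => l.length
decreasing_by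
  all_goals simp_all [List.isEmpty_iff]
  cases old <;> simp_all

theorem pvRep_nil (old new : List Char) : pvRep old new [] = [] := by rw [pvRep]

theorem pvRep_cons_empty (old new : List Char) (c : Char) (t : List Char)
    (he : old.isEmpty) : pvRep old new (c :: t) = c :: pvRep old new t := by
  rw [pvRep]; simp [he]

theorem pvRep_cons_pos (old new : List Char) (c : Char) (t : List Char)
    (h : old ≠ []) (hp : old.isPrefixOf (c :: t)) :
    pvRep old new (c :: t) = new ++ pvRep old new (List.drop old.length (c :: t)) := by
  rw [pvRep]; simp [List.isEmpty_iff, h, hp]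

theorem pvRep_cons_neg (old new : List Char) (c : Char) (t : List Char)
    (hp : ¬ old.isPrefixOf (c :: t)) :
    pvRep old new (c :: t) = c :: pvRep old new t := by
  rw [pvRep]
  by_cases he : old.isEmpty
  · simp [he]
  · simp [he, hp]

theorem pv_go_bridge (old new : List Char) (h : old ≠ []) :
    ∀ fuel (l acc : List Char), l.length ≤ fuel →
      PySem.Chars.replace.go old new fuel l acc = acc.reverse ++ pvRep old new l := by
  intro fuel
  induction fuel with
  | zero =>
    intro l acc hl
    have : l = [] := by cases l <;> simp_all
    subst this
    simp [PySem.Chars.replace.go, pvRep_nil]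
  | succ n ih =>
    intro l acc hl
    cases l with
    | nil => simp [PySem.Chars.replace.go, pvRep_nil]
    | cons c t =>
      by_cases hp : old.isPrefixOf (c :: t)
      · rw [show PySem.Chars.replace.go old new (n+1) (c::t) acc =
            PySem.Chars.replace.go old new n (List.drop old.length (c::t)) (new.reverse ++ acc) from by
              simp [PySem.Chars.replace.go, hp]]
        rw [ih _ _ (by simp; cases old with | nil => simp_all | cons o os => simp at hl ⊢; omega)]
        rw [pvRep_cons_pos old new c t h hp]
        simp
      · rw [show PySem.Chars.replace.go old new (n+1) (c::t) acc =
            PySem.Chars.replace.go old new n t (c :: acc) from by simp [PySem.Chars.replace.go, hp]]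
        rw [ih _ _ (by simp at hl ⊢; omega)]
        rw [pvRep_cons_neg old new c t hp]
        simp

theorem pv_replace_eq_rep (old new s : List Char) (h : old ≠ []) :
    PySem.Chars.replace s old new = pvRep old new s := by
  rw [PySem.Chars.replace]
  simp [List.isEmpty_iff, h]
  rw [pv_go_bridge old new h s.length s [] le_rfl]
  simp

-- a pass walks through a compatibility-free block u without matching inside it
theorem pvRep_append (old new u : List Char) (s : List Char) (h : pvCF u old) :
    pvRep old new (u ++ s) = u ++ pvRep old new s := by
  induction u with
  | nil => simp
  | cons c u' ih =>
    have h0 := h 0 (by simp)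
    simp only [List.drop_zero] at h0
    have hng : ¬ old.isPrefixOf (c :: (u' ++ s)) := by
      rw [List.isPrefixOf_iff_prefix]
      exact fun hp => pv_pref_append_false s h0.1 h0.2 (by simpa using hp)
    rw [List.cons_append, pvRep_cons_neg old new c (u' ++ s) hng]
    rw [ih (fun t ht => by simpa [List.drop_succ_cons] using h (t+1) (by simp; omega))]
    rfl

-- a pass whose key is the head replaces it and resumes after the replacement
theorem pvRep_head (old new : List Char) (s : List Char) (h : old ≠ []) :
    pvRep old new (old ++ s) = new ++ pvRep old new s := by
  cases old with
  | nil => exact absurd rfl h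
  | cons a os =>
    rw [List.cons_append, pvRep_cons_pos (a :: os) new a (os ++ s) h
        (by rw [List.isPrefixOf_iff_prefix]; exact (by simpa using List.prefix_append (a :: os) s))]
    congr 1
    rw [show a :: (os ++ s) = (a :: os) ++ s from rfl, List.drop_left]

-- a compatibility-free u found as a prefix of a pass's output was already a prefix of its input
theorem pvRep_reflect_aux (v : List Char) :
    ∀ n (s u old : List Char), s.length ≤ n → pvCF u v → u <+: pvRep old v s → u <+: s := by
  intro n
  induction n with
  | zero =>
    intro s u old hl hCF hp
    have : s = [] := by cases s <;> simp_all
    subst this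
    rwa [pvRep_nil] at hp
  | succ m ih =>
    intro s u old hl hCF hp
    cases s with
    | nil => rwa [pvRep_nil] at hp
    | cons c t =>
      have consCase : u <+: c :: pvRep old v t → u <+: c :: t := by
        intro hp'
        cases u with
        | nil => exact List.nil_prefix
        | cons a u' =>
          rw [List.cons_prefix_cons] at hp' ⊢
          refine ⟨hp'.1, ih t u' old (by simp at hl ⊢; omega)
            (fun j hj => by simpa [List.drop_succ_cons] using hCF (j+1) (by simp; omega)) hp'.2⟩
      by_cases he : old.isEmpty
      · rw [pvRep_cons_empty old v c t he] at hp
        exact consCase hp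
      · by_cases hpre : old.isPrefixOf (c :: t)
        · rw [pvRep_cons_pos old v c t (by simpa [List.isEmpty_iff] using he) hpre] at hp
          cases u with
          | nil => exact List.nil_prefix
          | cons a u' =>
            have h0 := hCF 0 (by simp)
            simp only [List.drop_zero] at h0
            rcases List.prefix_or_prefix_of_prefix hp (List.prefix_append v _) with h' | h'
            · exact absurd h' h0.1
            · exact absurd h' h0.2
        · rw [pvRep_cons_neg old v c t hpre] at hp
          exact consCase hp

theorem pvRep_reflect (v u s old : List Char) (hCF : pvCF u v) (h : u <+: pvRep old v s) :
    u <+: s :=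
  pvRep_reflect_aux v s.length s u old le_rfl hCF h

-- lifting "k does not match here" over an earlier pass's output
theorem pv_neg_lift (k old v : List Char) (c : Char) (t : List Char)
    (hCF : pvCF (k.drop 1) v) (hne : ¬ k <+: (c :: t)) : ¬ k <+: (c :: pvRep old v t) := by
  intro h
  cases k with
  | nil => exact hne List.nil_prefix
  | cons a kt =>
    rw [List.cons_prefix_cons] at h
    exact hne (List.cons_prefix_cons.mpr
      ⟨h.1, pvRep_reflect v kt t old (by simpa using hCF) h.2⟩)

-- unfolding equations for pvScanB
theorem pvScanB_nil : pvScanB [] = [] := by rw [pvScanB]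

theorem pvScanB_cons_some (c : Char) (t new : List Char) (n : Nat)
    (h : pvFindB pvReplB (c :: t) = some (new, n)) :
    pvScanB (c :: t) = new ++ pvScanB (List.drop n (c :: t)) := by
  rw [pvScanB]; split <;> simp_all

theorem pvScanB_cons_none (c : Char) (t : List Char)
    (h : pvFindB pvReplB (c :: t) = none) :
    pvScanB (c :: t) = c :: pvScanB t := by
  rw [pvScanB]; split <;> simp_all

-- pvFindB on the concrete table, unfolded
theorem pvFindB_eq (s : List Char) :
    pvFindB pvReplB s =
      if pvK1.isPrefixOf s then some (pvV1, pvK1.length)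
      else if pvK2.isPrefixOf s then some (pvV2, pvK2.length)
      else if pvK3.isPrefixOf s then some (pvV3, pvK3.length)
      else if pvK4.isPrefixOf s then some (pvV4, pvK4.length)
      else if pvK5.isPrefixOf s then some (pvV5, pvK5.length)
      else none := rfl

theorem pvLenK : pvK1.length = 22 ∧ pvK2.length = 23 ∧ pvK3.length = 28 ∧ pvK4.length = 11 ∧ pvK5.length = 14 := by decide

-- A's five passes, on char lists
def pvRepAll (s : List Char) : List Char :=
  pvRep pvK5 pvV5 (pvRep pvK4 pvV4 (pvRep pvK3 pvV3 (pvRep pvK2 pvV2 (pvRep pvK1 pvV1 s))))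

theorem pv_A_form (text : String) :
    humanize_legal_text text = String.ofList (pvRepAll text.toList) := by
  simp only [humanize_legal_text, List.foldl, PySem.Str.replace, String.toList_ofList]
  rw [pv_replace_eq_rep "based on the foregoing".toList "based on the evidence provided".toList _ (by decide)]
  rw [pv_replace_eq_rep "We respectfully request".toList "We request".toList _ (by decide)]
  rw [pv_replace_eq_rep "it is respectfully submitted".toList "we submit".toList _ (by decide)]
  rw [pv_replace_eq_rep "pursuant to".toList "under".toList _ (by decide)]
  rw [pv_replace_eq_rep "hereby certify".toList "certify".toList _ (by decide)]
  rfl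

-- the main equivalence on char lists
theorem pv_main : ∀ n (s : List Char), s.length ≤ n → pvRepAll s = pvScanB s := by
  intro n
  induction n with
  | zero =>
    intro s hl
    have : s = [] := by cases s <;> simp_all
    subst this
    simp [pvRepAll, pvRep_nil, pvScanB_nil]
  | succ m ih =>
    intro s hl
    cases s with
    | nil => simp [pvRepAll, pvRep_nil, pvScanB_nil]
    | cons c t =>
      by_cases h1 : pvK1 <+: (c :: t)
      ·
        have hp : pvK1.isPrefixOf (c :: t) = true := by
          rw [List.isPrefixOf_iff_prefix]; exact h1
        obtain ⟨s1, hs⟩ := h1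
        have hfind : pvFindB pvReplB (c :: t) = some (pvV1, pvK1.length) := by
          rw [pvFindB_eq]
          rw [if_pos hp]
        rw [pvScanB_cons_some c t _ _ hfind, ← hs, List.drop_left]
        have hlen : s1.length ≤ m := by
          have hc := congrArg List.length hs
          rw [List.length_append, pvLenK.1] at hc
          simp at hc hl
          omega
        rw [show pvRepAll (pvK1 ++ s1) = pvV1 ++ pvRepAll s1 from by
          unfold pvRepAll
          rw [pvRep_head pvK1 pvV1 _ (by decide),
              pvRep_append pvK2 pvV2 pvV1 _ (by decide),
              pvRep_append pvK3 pvV3 pvV1 _ (by decide),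
              pvRep_append pvK4 pvV4 pvV1 _ (by decide),
              pvRep_append pvK5 pvV5 pvV1 _ (by decide)]]
        rw [ih s1 hlen]
      · by_cases h2 : pvK2 <+: (c :: t)
        ·
          have hp : pvK2.isPrefixOf (c :: t) = true := by
            rw [List.isPrefixOf_iff_prefix]; exact h2
          obtain ⟨s2, hs⟩ := h2
          have hfind : pvFindB pvReplB (c :: t) = some (pvV2, pvK2.length) := by
            rw [pvFindB_eq]
            rw [if_neg (show ¬ pvK1.isPrefixOf (c :: t) = true from by rw [List.isPrefixOf_iff_prefix]; exact h1),
                if_pos hp]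
          rw [pvScanB_cons_some c t _ _ hfind, ← hs, List.drop_left]
          have hlen : s2.length ≤ m := by
            have hc := congrArg List.length hs
            rw [List.length_append, pvLenK.2.1] at hc
            simp at hc hl
            omega
          rw [show pvRepAll (pvK2 ++ s2) = pvV2 ++ pvRepAll s2 from by
            unfold pvRepAll
            rw [pvRep_append pvK1 pvV1 pvK2 _ (by decide),
                pvRep_head pvK2 pvV2 _ (by decide),
                pvRep_append pvK3 pvV3 pvV2 _ (by decide),
                pvRep_append pvK4 pvV4 pvV2 _ (by decide),
                pvRep_append pvK5 pvV5 pvV2 _ (by decide)]]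
          rw [ih s2 hlen]
        · by_cases h3 : pvK3 <+: (c :: t)
          ·
            have hp : pvK3.isPrefixOf (c :: t) = true := by
              rw [List.isPrefixOf_iff_prefix]; exact h3
            obtain ⟨s3, hs⟩ := h3
            have hfind : pvFindB pvReplB (c :: t) = some (pvV3, pvK3.length) := by
              rw [pvFindB_eq]
              rw [if_neg (show ¬ pvK1.isPrefixOf (c :: t) = true from by rw [List.isPrefixOf_iff_prefix]; exact h1),
                  if_neg (show ¬ pvK2.isPrefixOf (c :: t) = true from by rw [List.isPrefixOf_iff_prefix]; exact h2),
                  if_pos hp]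
            rw [pvScanB_cons_some c t _ _ hfind, ← hs, List.drop_left]
            have hlen : s3.length ≤ m := by
              have hc := congrArg List.length hs
              rw [List.length_append, pvLenK.2.2.1] at hc
              simp at hc hl
              omega
            rw [show pvRepAll (pvK3 ++ s3) = pvV3 ++ pvRepAll s3 from by
              unfold pvRepAll
              rw [pvRep_append pvK1 pvV1 pvK3 _ (by decide),
                  pvRep_append pvK2 pvV2 pvK3 _ (by decide),
                  pvRep_head pvK3 pvV3 _ (by decide),
                  pvRep_append pvK4 pvV4 pvV3 _ (by decide),
                  pvRep_append pvK5 pvV5 pvV3 _ (by decide)]]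
            rw [ih s3 hlen]
          · by_cases h4 : pvK4 <+: (c :: t)
            ·
              have hp : pvK4.isPrefixOf (c :: t) = true := by
                rw [List.isPrefixOf_iff_prefix]; exact h4
              obtain ⟨s4, hs⟩ := h4
              have hfind : pvFindB pvReplB (c :: t) = some (pvV4, pvK4.length) := by
                rw [pvFindB_eq]
                rw [if_neg (show ¬ pvK1.isPrefixOf (c :: t) = true from by rw [List.isPrefixOf_iff_prefix]; exact h1),
                    if_neg (show ¬ pvK2.isPrefixOf (c :: t) = true from by rw [List.isPrefixOf_iff_prefix]; exact h2),
                    if_neg (show ¬ pvK3.isPrefixOf (c :: t) = true from by rw [List.isPrefixOf_iff_prefix]; exact h3),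
                    if_pos hp]
              rw [pvScanB_cons_some c t _ _ hfind, ← hs, List.drop_left]
              have hlen : s4.length ≤ m := by
                have hc := congrArg List.length hs
                rw [List.length_append, pvLenK.2.2.2.1] at hc
                simp at hc hl
                omega
              rw [show pvRepAll (pvK4 ++ s4) = pvV4 ++ pvRepAll s4 from by
                unfold pvRepAll
                rw [pvRep_append pvK1 pvV1 pvK4 _ (by decide),
                    pvRep_append pvK2 pvV2 pvK4 _ (by decide),
                    pvRep_append pvK3 pvV3 pvK4 _ (by decide),
                    pvRep_head pvK4 pvV4 _ (by decide),
                    pvRep_append pvK5 pvV5 pvV4 _ (by decide)]]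
              rw [ih s4 hlen]
            · by_cases h5 : pvK5 <+: (c :: t)
              ·
                have hp : pvK5.isPrefixOf (c :: t) = true := by
                  rw [List.isPrefixOf_iff_prefix]; exact h5
                obtain ⟨s5, hs⟩ := h5
                have hfind : pvFindB pvReplB (c :: t) = some (pvV5, pvK5.length) := by
                  rw [pvFindB_eq]
                  rw [if_neg (show ¬ pvK1.isPrefixOf (c :: t) = true from by rw [List.isPrefixOf_iff_prefix]; exact h1),
                      if_neg (show ¬ pvK2.isPrefixOf (c :: t) = true from by rw [List.isPrefixOf_iff_prefix]; exact h2),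
                      if_neg (show ¬ pvK3.isPrefixOf (c :: t) = true from by rw [List.isPrefixOf_iff_prefix]; exact h3),
                      if_neg (show ¬ pvK4.isPrefixOf (c :: t) = true from by rw [List.isPrefixOf_iff_prefix]; exact h4),
                      if_pos hp]
                rw [pvScanB_cons_some c t _ _ hfind, ← hs, List.drop_left]
                have hlen : s5.length ≤ m := by
                  have hc := congrArg List.length hs
                  rw [List.length_append, pvLenK.2.2.2.2] at hc
                  simp at hc hl
                  omega
                rw [show pvRepAll (pvK5 ++ s5) = pvV5 ++ pvRepAll s5 from by
                  unfold pvRepAll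
                  rw [pvRep_append pvK1 pvV1 pvK5 _ (by decide),
                      pvRep_append pvK2 pvV2 pvK5 _ (by decide),
                      pvRep_append pvK3 pvV3 pvK5 _ (by decide),
                      pvRep_append pvK4 pvV4 pvK5 _ (by decide),
                      pvRep_head pvK5 pvV5 _ (by decide)]]
                rw [ih s5 hlen]
              ·
                have hfind : pvFindB pvReplB (c :: t) = none := by
                  rw [pvFindB_eq]
                  rw [if_neg (show ¬ pvK1.isPrefixOf (c :: t) = true from by rw [List.isPrefixOf_iff_prefix]; exact h1),
                      if_neg (show ¬ pvK2.isPrefixOf (c :: t) = true from by rw [List.isPrefixOf_iff_prefix]; exact h2),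
                      if_neg (show ¬ pvK3.isPrefixOf (c :: t) = true from by rw [List.isPrefixOf_iff_prefix]; exact h3),
                      if_neg (show ¬ pvK4.isPrefixOf (c :: t) = true from by rw [List.isPrefixOf_iff_prefix]; exact h4),
                      if_neg (show ¬ pvK5.isPrefixOf (c :: t) = true from by rw [List.isPrefixOf_iff_prefix]; exact h5)]
                rw [pvScanB_cons_none c t hfind]
                have g1 : ¬ pvK1.isPrefixOf (c :: t) := by
                  rw [List.isPrefixOf_iff_prefix]; exact h1
                have g2 : ¬ pvK2 <+: (c :: pvRep pvK1 pvV1 t) :=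
                  pv_neg_lift pvK2 pvK1 pvV1 c t (by decide) h2
                have g3a : ¬ pvK3 <+: (c :: pvRep pvK1 pvV1 t) :=
                  pv_neg_lift pvK3 pvK1 pvV1 c t (by decide) h3
                have g3 : ¬ pvK3 <+: (c :: pvRep pvK2 pvV2 (pvRep pvK1 pvV1 t)) :=
                  pv_neg_lift pvK3 pvK2 pvV2 c _ (by decide) g3a
                have g4a : ¬ pvK4 <+: (c :: pvRep pvK1 pvV1 t) :=
                  pv_neg_lift pvK4 pvK1 pvV1 c t (by decide) h4
                have g4b : ¬ pvK4 <+: (c :: pvRep pvK2 pvV2 (pvRep pvK1 pvV1 t)) :=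
                  pv_neg_lift pvK4 pvK2 pvV2 c _ (by decide) g4a
                have g4 : ¬ pvK4 <+: (c :: pvRep pvK3 pvV3 (pvRep pvK2 pvV2 (pvRep pvK1 pvV1 t))) :=
                  pv_neg_lift pvK4 pvK3 pvV3 c _ (by decide) g4b
                have g5a : ¬ pvK5 <+: (c :: pvRep pvK1 pvV1 t) :=
                  pv_neg_lift pvK5 pvK1 pvV1 c t (by decide) h5
                have g5b : ¬ pvK5 <+: (c :: pvRep pvK2 pvV2 (pvRep pvK1 pvV1 t)) :=
                  pv_neg_lift pvK5 pvK2 pvV2 c _ (by decide) g5a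
                have g5c : ¬ pvK5 <+: (c :: pvRep pvK3 pvV3 (pvRep pvK2 pvV2 (pvRep pvK1 pvV1 t))) :=
                  pv_neg_lift pvK5 pvK3 pvV3 c _ (by decide) g5b
                have g5 : ¬ pvK5 <+: (c :: pvRep pvK4 pvV4 (pvRep pvK3 pvV3 (pvRep pvK2 pvV2 (pvRep pvK1 pvV1 t)))) :=
                  pv_neg_lift pvK5 pvK4 pvV4 c _ (by decide) g5c
                rw [show pvRepAll (c :: t) = c :: pvRepAll t from by
                  unfold pvRepAll
                  rw [pvRep_cons_neg pvK1 pvV1 c t g1,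
                      pvRep_cons_neg pvK2 pvV2 c _ (by rw [List.isPrefixOf_iff_prefix]; exact g2),
                      pvRep_cons_neg pvK3 pvV3 c _ (by rw [List.isPrefixOf_iff_prefix]; exact g3),
                      pvRep_cons_neg pvK4 pvV4 c _ (by rw [List.isPrefixOf_iff_prefix]; exact g4),
                      pvRep_cons_neg pvK5 pvV5 c _ (by rw [List.isPrefixOf_iff_prefix]; exact g5)]]
                rw [ih t (by simp at hl ⊢; omega)]

-- ===== VERDICT (by name: the statement is the Claim_ definition above) =====
theorem humanize_legal_text_spec : Claim_equal_humanize_legal_text := by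
  intro text _
  unfold Spec_humanize_legal_text humanize_legal_text_alt
  rw [pv_A_form text, pv_main (text.toList.length) text.toList le_rfl]
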